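-- pv_equiv track=rewrite | github.com/taivop/os14 | src/malu/data_defs.py | getFreeBlocks
-- ===== SOURCE A (Python) =====
-- def sortBlocksByField(blocks, field):
--     if isinstance(field, str):
--         field = blockFieldNameToInt(field)
--     return sorted(blocks, key=lambda tup: tup[field])
--
-- def blockFieldNameToInt(fieldName):
--     if fieldName.lower() == "id":
--         return 0
--     elif fieldName.lower() in ["duration", "left", "duration left"]:
--         return 1
--     elif fieldName.lower() in ["start", "start index"]:
--         return 2
--     elif fieldName.lower() in ["size", "size in memory"]:
--         return 3
--     else:       # unrecognised field key => throw error
--         raise Exception("blockFieldNameToInt: Unknown field name")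
--
-- def getFreeBlocks(memory_state, MEMORY_SIZE):
--     sorted_blocks = sortBlocksByField(memory_state, "start index")
--
--     freeBlocks = []
--
--     freeBlockStartIndex = 0
--
--     if not sorted_blocks:
--         return [(None, None, 0, MEMORY_SIZE)]
--     else:
--         firstOccupied = sorted_blocks[0]
--         if firstOccupied[2] != 0:
--             freeBlock = (None, None, 0, firstOccupied[2])
--             freeBlocks.append(freeBlock)
--         freeBlockStartIndex = firstOccupied[2] + firstOccupied[3]
--
--         for block in sorted_blocks[1:]:
--             if block[2] > freeBlockStartIndex:
--                 # add free block to list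
--                 freeBlock = (None, None, freeBlockStartIndex, block[2] - freeBlockStartIndex)
--                 freeBlocks.append(freeBlock)
--
--             freeBlockStartIndex = block[2] + block[3]     # remember end index of last block
--
--         # now check if the end of last block was at MEMORY_SIZE, if not then add another free block
--         if freeBlockStartIndex < MEMORY_SIZE:
--             freeBlocks.append((None, None, freeBlockStartIndex, MEMORY_SIZE - freeBlockStartIndex))
--
--     #raise Exception("getFreeBlocks: not implemented")
--     #for block in memory_state:
--     return freeBlocks
-- ===== SOURCE B (Python) =====
-- def _inner(blocks):
--     # interior gaps of a run of sorted blocks, by divide and conquer on halves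
--     if len(blocks) < 2:
--         return []
--     k = len(blocks) // 2
--     left, right = blocks[:k], blocks[k:]
--     e = left[-1][2] + left[-1][3]
--     s = right[0][2]
--     mid = [(None, None, e, s - e)] if s > e else []
--     return _inner(left) + mid + _inner(right)
--
-- def getFreeBlocks(memory_state, MEMORY_SIZE):
--     blocks = sorted(memory_state, key=lambda b: b[2])
--     if not blocks:
--         return [(None, None, 0, MEMORY_SIZE)]
--     first, last = blocks[0], blocks[-1]
--     head = [(None, None, 0, first[2])] if first[2] != 0 else []
--     end = last[2] + last[3]
--     tail = [(None, None, end, MEMORY_SIZE - end)] if end < MEMORY_SIZE else []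
--     return head + _inner(blocks) + tail
-- ===== Notes on version B (the rewrite author's own statement) =====
-- stated objective: alternative
-- what changed: A threads a mutable prev-end accumulator through a special-cased first block and a left-to-right loop over sorted_blocks[1:]; B computes the interior gaps by divide and conquer (split the sorted list in halves, recurse on each half, join with the single boundary gap) with the head and tail gaps composed around it, correct because each gap depends only on one consecutive pair of sorted blocks.
import Mathlib
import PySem

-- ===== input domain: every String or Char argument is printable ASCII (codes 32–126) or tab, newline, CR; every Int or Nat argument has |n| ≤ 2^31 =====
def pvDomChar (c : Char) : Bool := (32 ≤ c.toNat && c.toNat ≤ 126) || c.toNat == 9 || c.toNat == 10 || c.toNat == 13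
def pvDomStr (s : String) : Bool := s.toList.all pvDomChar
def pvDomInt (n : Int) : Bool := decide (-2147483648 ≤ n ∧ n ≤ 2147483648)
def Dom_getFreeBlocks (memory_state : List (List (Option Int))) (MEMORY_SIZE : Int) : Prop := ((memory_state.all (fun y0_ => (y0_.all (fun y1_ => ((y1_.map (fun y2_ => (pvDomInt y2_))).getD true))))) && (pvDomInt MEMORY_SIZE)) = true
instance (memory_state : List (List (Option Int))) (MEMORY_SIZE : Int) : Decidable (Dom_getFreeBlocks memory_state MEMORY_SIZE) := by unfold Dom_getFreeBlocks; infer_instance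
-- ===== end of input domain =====

-- B replaces A's accumulator loop (special-cased first block + left-to-right scan of the tail)
-- by divide and conquer: interior gaps of the sorted list are computed by splitting in halves and
-- joining with the boundary gap; head/tail gaps are composed around it. Same return value wherever A returns.

-- ===== PORT A =====
-- block[2] / block[3]: exact (List.getD at a nonnegative literal index) on inputs satisfying
-- Pre_getFreeBlocks (length ≥ 4, entries 2 and 3 non-None); outside Pre_ Python raises.
def pvStart (b : List (Option Int)) : Int := (b.getD 2 none).getD 0
def pvSize (b : List (Option Int)) : Int := (b.getD 3 none).getD 0

-- the body of A's for-loop: state = (freeBlocks, freeBlockStartIndex)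
def pvStepA (st : List (List (Option Int)) × Int) (block : List (Option Int)) :
    List (List (Option Int)) × Int :=
  ((if pvStart block > st.2 then
      st.1 ++ [[none, none, some st.2, some (pvStart block - st.2)]]
    else st.1),
   pvStart block + pvSize block)

def getFreeBlocks (memory_state : List (List (Option Int))) (MEMORY_SIZE : Int) :
    List (List (Option Int)) :=
  let sorted_blocks := PySem.List.sorted memory_state (fun tup => pvStart tup) false
  match sorted_blocks with
  | [] => [[none, none, some 0, some MEMORY_SIZE]]
  | firstOccupied :: rest =>
    let freeBlocks : List (List (Option Int)) :=
      if pvStart firstOccupied ≠ 0 then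
        [[none, none, some 0, some (pvStart firstOccupied)]]
      else []
    let st := rest.foldl pvStepA (freeBlocks, pvStart firstOccupied + pvSize firstOccupied)
    if st.2 < MEMORY_SIZE then
      st.1 ++ [[none, none, some st.2, some (MEMORY_SIZE - st.2)]]
    else st.1

-- ===== PORT B =====
-- the boundary gap between block x (left) and block y (right)
def pvGapPair (x y : List (Option Int)) : List (List (Option Int)) :=
  if pvStart y > pvStart x + pvSize x then
    [[none, none, some (pvStart x + pvSize x), some (pvStart y - (pvStart x + pvSize x))]]
  else []

-- Source B's _inner: divide and conquer over halves of the sorted run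
def pvInner (xs : List (List (Option Int))) : List (List (Option Int)) :=
  if h : xs.length < 2 then []
  else
    let k := xs.length / 2
    pvInner (xs.take k) ++ pvGapPair ((xs.take k).getLastD []) ((xs.drop k).headD [])
      ++ pvInner (xs.drop k)
termination_by xs.length
decreasing_by
  · simp only [List.length_take]; omega
  · simp only [List.length_drop]; omega

def getFreeBlocks_alt (memory_state : List (List (Option Int))) (MEMORY_SIZE : Int) :
    List (List (Option Int)) :=
  let blocks := PySem.List.sorted memory_state (fun b => pvStart b) false
  match blocks with
  | [] => [[none, none, some 0, some MEMORY_SIZE]]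
  | first :: brest =>
    let lastB := (first :: brest).getLastD []
    let head : List (List (Option Int)) :=
      if pvStart first ≠ 0 then [[none, none, some 0, some (pvStart first)]] else []
    let endv := pvStart lastB + pvSize lastB
    let tail : List (List (Option Int)) :=
      if endv < MEMORY_SIZE then [[none, none, some endv, some (MEMORY_SIZE - endv)]] else []
    head ++ pvInner (first :: brest) ++ tail

-- ===== PRECONDITION & SPEC =====
-- Pre_ admits exactly the well-formed block lists: each block has ≥ 4 fields and non-None start/size;
-- everywhere else Python A raises (IndexError/TypeError on b[2], b[3], sort-key comparison or arithmetic).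
def Pre_getFreeBlocks (memory_state : List (List (Option Int))) (MEMORY_SIZE : Int) : Prop :=
  ∀ b ∈ memory_state, 4 ≤ b.length ∧ (b.getD 2 none).isSome ∧ (b.getD 3 none).isSome

instance (memory_state : List (List (Option Int))) (MEMORY_SIZE : Int) :
    Decidable (Pre_getFreeBlocks memory_state MEMORY_SIZE) := by
  unfold Pre_getFreeBlocks; infer_instance

def pvWitness_getFreeBlocks : List (List (Option Int)) × Int :=
  ([[some 1, some 0, some 2, some 3]], 10)

def Spec_getFreeBlocks (memory_state : List (List (Option Int))) (MEMORY_SIZE : Int)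
    (out : List (List (Option Int))) : Prop := out = getFreeBlocks_alt memory_state MEMORY_SIZE
instance (memory_state : List (List (Option Int))) (MEMORY_SIZE : Int)
    (out : List (List (Option Int))) : Decidable (Spec_getFreeBlocks memory_state MEMORY_SIZE out) := by
  unfold Spec_getFreeBlocks; infer_instance

-- ===== CLAIM (what is proved, stated in full; the proofs are below) =====
def Claim_equal_getFreeBlocks : Prop := ∀ (memory_state : List (List (Option Int))) (MEMORY_SIZE : Int), Dom_getFreeBlocks memory_state MEMORY_SIZE → Pre_getFreeBlocks memory_state MEMORY_SIZE → Spec_getFreeBlocks memory_state MEMORY_SIZE (getFreeBlocks memory_state MEMORY_SIZE)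

-- ===== LEMMAS AND PROOFS =====

-- the consecutive-pair gap list (proof-only bridge between the two programs)
def pairGaps : List (List (Option Int)) → List (List (Option Int))
  | x :: y :: t => pvGapPair x y ++ pairGaps (y :: t)
  | _ => []

theorem pairGaps_append (xs ys : List (List (Option Int))) (hx : xs ≠ []) (hy : ys ≠ []) :
    pairGaps (xs ++ ys) =
      pairGaps xs ++ pvGapPair (xs.getLastD []) (ys.headD []) ++ pairGaps ys := by
  induction xs with
  | nil => exact absurd rfl hx
  | cons a t ih =>
    cases t with
    | nil => cases ys with
      | nil => exact absurd rfl hy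
      | cons y yt => simp [pairGaps]
    | cons b r =>
      have : pairGaps ((a :: b :: r) ++ ys) = pvGapPair a b ++ pairGaps ((b :: r) ++ ys) := by
        simp [pairGaps]
      rw [this, ih (by simp)]
      simp [pairGaps, List.getLastD]

theorem pvInner_eq_pairGaps (xs : List (List (Option Int))) : pvInner xs = pairGaps xs := by
  induction hn : xs.length using Nat.strong_induction_on generalizing xs with
  | _ n ih =>
  by_cases h : xs.length < 2
  · rw [pvInner, dif_pos h]
    match xs with
    | [] => rfl
    | [_] => rfl
  · rw [pvInner, dif_neg h]
    show pvInner (xs.take (xs.length / 2)) ++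
        pvGapPair ((xs.take (xs.length / 2)).getLastD []) ((xs.drop (xs.length / 2)).headD [])
        ++ pvInner (xs.drop (xs.length / 2)) = pairGaps xs
    have h2 : 2 ≤ xs.length := by omega
    have hk1 : 1 ≤ xs.length / 2 := by omega
    have hk2 : xs.length / 2 < xs.length := by omega
    have htake : (xs.take (xs.length / 2)).length = xs.length / 2 := by
      simp [List.length_take]; omega
    have hdrop : (xs.drop (xs.length / 2)).length = xs.length - xs.length / 2 := by
      simp [List.length_drop]
    rw [ih _ (by omega) _ htake, ih _ (by omega) _ hdrop]
    rw [← pairGaps_append _ _ (by intro he; rw [he] at htake; simp at htake; omega)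
        (by intro he; rw [he] at hdrop; simp at hdrop; omega)]
    rw [List.take_append_drop]

-- A's loop, started after block p, produces the consecutive-pair gaps and the last block's end
theorem pv_loop_eq (rest : List (List (Option Int))) (acc : List (List (Option Int)))
    (p : List (Option Int)) :
    rest.foldl pvStepA (acc, pvStart p + pvSize p) =
      (acc ++ pairGaps (p :: rest),
       pvStart ((p :: rest).getLastD []) + pvSize ((p :: rest).getLastD [])) := by
  induction rest generalizing acc p with
  | nil => simp [pairGaps]
  | cons b r ih =>
    simp only [List.foldl_cons]
    have hstep : pvStepA (acc, pvStart p + pvSize p) b =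
        (acc ++ pvGapPair p b, pvStart b + pvSize b) := by
      simp only [pvStepA, pvGapPair]
      split_ifs <;> simp
    rw [hstep, ih]
    have : pairGaps (p :: b :: r) = pvGapPair p b ++ pairGaps (b :: r) := by simp [pairGaps]
    simp [this, List.getLastD, List.append_assoc]

-- ===== VERDICT (by name: the statement is the Claim_ definition above) =====
theorem getFreeBlocks_spec : Claim_equal_getFreeBlocks := by
  intro memory_state MEMORY_SIZE _ _
  unfold Spec_getFreeBlocks getFreeBlocks getFreeBlocks_alt
  cases h : PySem.List.sorted memory_state (fun tup => pvStart tup) false with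
  | nil => simp
  | cons first rest =>
    have hl := pv_loop_eq rest
      (if pvStart first ≠ 0 then [[none, none, some 0, some (pvStart first)]] else []) first
    simp only [hl, pvInner_eq_pairGaps]
    split_ifs <;> simp
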